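-- pv_equiv track=rewrite | github.com/chl218/Bioinformatics | 00-Finding-Hidden-Messages-in-DNA/01-Where-in-the-Genome-Does-Replication-Begin/patterns.py | FindAllKmers
-- ===== SOURCE A (Python) =====
-- def PatternCount(Text, Pattern):
--
--     textLen    = len(Text)
--     patternLen = len(Pattern)
--
--     count = 0
--     for i in range(0, textLen - patternLen + 1):
--         if Text[i:i+patternLen] == Pattern:
--             count += 1
--
--     return count
--
-- def FindAllKmers(Text, k):
--     textLen = len(Text)
--
--     frequentPatterns = set()
--     count = [0] * textLen
--
--     # Search for k-mer patterns
--     for i in range(0, textLen - k + 1):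
--         pattern = Text[i:i+k]
--         count[i] = PatternCount(Text, pattern)
--     # Search for most frequent k-mers
--     for i in range(0, textLen - k + 1):
--         if count[i] > 1:
--             frequentPatterns.add(Text[i:i+k])
--
--     return frequentPatterns
-- ===== SOURCE B (Python) =====
-- def FindAllKmers(Text, k):
--     # One counting pass over all k-mers instead of a quadratic PatternCount re-scan per position.
--     counts = {}
--     for i in range(0, len(Text) - k + 1):
--         kmer = Text[i:i+k]
--         counts[kmer] = counts.get(kmer, 0) + 1
--     return {kmer for kmer, c in counts.items() if c > 1}
-- ===== Notes on version B (the rewrite author's own statement) =====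
-- stated objective: faster
-- what changed: A calls PatternCount (a full scan of Text) for every position; B makes one pass building a dictionary of k-mer counts and returns the keys with count > 1.
import Mathlib
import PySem

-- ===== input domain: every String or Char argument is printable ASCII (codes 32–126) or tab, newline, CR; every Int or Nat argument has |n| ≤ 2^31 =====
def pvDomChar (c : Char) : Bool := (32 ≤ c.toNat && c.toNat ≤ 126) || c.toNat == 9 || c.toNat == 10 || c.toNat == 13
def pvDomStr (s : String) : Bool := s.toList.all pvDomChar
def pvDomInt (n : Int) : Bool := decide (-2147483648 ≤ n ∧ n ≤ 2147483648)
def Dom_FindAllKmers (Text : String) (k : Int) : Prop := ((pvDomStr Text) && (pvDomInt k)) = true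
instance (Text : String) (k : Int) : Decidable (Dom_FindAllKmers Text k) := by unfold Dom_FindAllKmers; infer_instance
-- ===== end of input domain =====

-- B replaces A's per-position PatternCount re-scan by a single dictionary counting pass; objective: faster.
-- (A raises IndexError on every input with k ≤ 0; Pre_ excludes exactly those inputs.)


-- ===== PORT A =====
def PatternCount (Text Pattern : String) : Int :=
  let textLen := PySem.Str.len Text
  let patternLen := PySem.Str.len Pattern
  (PySem.List.pyRange 0 (textLen - patternLen + 1)).foldl
    (fun count i =>
      if PySem.Str.slice Text (some i) (some (i + patternLen)) == Pattern then count + 1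
      else count) 0

def FindAllKmers (Text : String) (k : Int) : List String :=
  let textLen := PySem.Str.len Text
  let count0 : List Int := List.replicate textLen.toNat 0
  -- first loop: count[i] = PatternCount(Text, Text[i:i+k])
  let count := (PySem.List.pyRange 0 (textLen - k + 1)).foldl
    (fun cnt i =>
      PySem.List.pySetD cnt i (PatternCount Text (PySem.Str.slice Text (some i) (some (i + k)))))
    count0
  -- second loop: collect Text[i:i+k] with count[i] > 1 into a set
  (PySem.List.pyRange 0 (textLen - k + 1)).foldl
    (fun s i =>
      if PySem.List.pyGetD count i 0 > 1 then
        PySem.Set.add s (PySem.Str.slice Text (some i) (some (i + k)))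
      else s)
    PySem.Set.empty

-- ===== PORT B =====
def FindAllKmers_alt (Text : String) (k : Int) : List String :=
  -- one counting pass: counts[kmer] = counts.get(kmer, 0) + 1
  let counts := (PySem.List.pyRange 0 (PySem.Str.len Text - k + 1)).foldl
    (fun d i =>
      let kmer := PySem.Str.slice Text (some i) (some (i + k))
      d.insert kmer (d.getD kmer 0 + 1))
    (PySem.Dict.empty : PySem.Dict String Int)
  -- {kmer for kmer, c in counts.items() if c > 1}
  counts.items.foldl
    (fun s p => if p.2 > 1 then PySem.Set.add s p.1 else s) PySem.Set.empty

-- ===== PRECONDITION & SPEC =====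
-- Pre_ excludes exactly k ≤ 0, on which A always raises IndexError (count[i] is written for i up to len(Text)-k ≥ len(Text)).
def Pre_FindAllKmers (Text : String) (k : Int) : Prop := 1 ≤ k
instance (Text : String) (k : Int) : Decidable (Pre_FindAllKmers Text k) := by unfold Pre_FindAllKmers; infer_instance
def pvWitness_FindAllKmers : String × Int := ("ababab", 2)

def Spec_FindAllKmers (Text : String) (k : Int) (out : List String) : Prop := out = FindAllKmers_alt Text k
instance (Text : String) (k : Int) (out : List String) : Decidable (Spec_FindAllKmers Text k out) := by unfold Spec_FindAllKmers; infer_instance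

-- ===== CLAIM (what is proved, stated in full; the proofs are below) =====
def Claim_equal_FindAllKmers : Prop := ∀ (Text : String) (k : Int), Dom_FindAllKmers Text k → Pre_FindAllKmers Text k → Spec_FindAllKmers Text k (FindAllKmers Text k)

-- ===== LEMMAS AND PROOFS =====

-- range(0, b) in Python is the naturals below b (empty for b ≤ 0)
theorem pyRange_zero (b : Int) :
    PySem.List.pyRange 0 b = (List.range b.toNat).map (fun (t : Nat) => (t : Int)) := by
  rw [PySem.List.pyRange_of_pos 0 b (by norm_num)]
  have : (if (0:Int) < b then ((b - 0 + 1 - 1)/1).toNat else 0) = b.toNat := by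
    split <;> omega
  rw [this]
  apply List.map_congr_left; intro a _; omega

-- first-occurrence dedup, the common normal form of both ports' set-building folds
def fdedup : List String → List String
  | [] => []
  | x :: L => x :: (fdedup L).filter (fun y => y ≠ x)

-- the conditional-add fold over a list, in closed form
theorem fold_step_closed (p : String → Bool) (L : List String) :
    ∀ (s : PySem.Set String),
    L.foldl (fun s x => if p x then PySem.Set.add s x else s) s
      = s ++ (fdedup L).filter (fun x => p x && !(decide (x ∈ s))) := by
  induction L with
  | nil => intro s; simp [fdedup]
  | cons x L ih =>
    intro s
    simp only [List.foldl_cons, fdedup]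
    by_cases hp : p x
    · by_cases hm : x ∈ s
      · have hstep : (if p x then PySem.Set.add s x else s) = s := by
          simp [hp, PySem.Set.add, PySem.Set.contains, hm]
        rw [hstep, ih s]
        congr 1
        rw [List.filter_cons]
        simp only [hp, hm, decide_true, Bool.not_true, Bool.and_false]
        rw [List.filter_filter]
        apply List.filter_congr
        intro y hy
        by_cases hyx : y = x
        · subst hyx; simp [hm]
        · simp [hyx]
      · have hstep : (if p x then PySem.Set.add s x else s) = s ++ [x] := by
          simp [hp, PySem.Set.add, PySem.Set.contains, hm]
        rw [hstep, ih (s ++ [x])]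
        rw [List.filter_cons]
        simp only [hp, hm, decide_false, Bool.not_false, Bool.and_true, if_true]
        rw [List.append_assoc, List.singleton_append]
        congr 2
        rw [List.filter_filter]
        apply List.filter_congr
        intro y hy
        by_cases hyx : y = x
        · subst hyx; simp
        · simp [hyx, List.mem_append]
    · have hstep : (if p x then PySem.Set.add s x else s) = s := by simp [hp]
      rw [hstep, ih s]
      congr 1
      rw [List.filter_cons]
      simp only [hp, Bool.false_and]
      rw [List.filter_filter]
      apply List.filter_congr
      intro y hy
      by_cases hyx : y = x
      · subst hyx; simp [hp]
      · simp [hyx]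

theorem fdedup_nodup (L : List String) : (fdedup L).Nodup := by
  induction L with
  | nil => simp [fdedup]
  | cons x L ih =>
    simp only [fdedup, List.nodup_cons]
    exact ⟨by simp, ih.filter _⟩

theorem fdedup_eq_self_of_nodup (L : List String) (h : L.Nodup) : fdedup L = L := by
  induction L with
  | nil => rfl
  | cons x L ih =>
    simp only [List.nodup_cons] at h
    simp only [fdedup, ih h.2]
    congr 1
    apply List.filter_eq_self.2
    intro y hy
    simp only [decide_eq_true_eq]
    rintro rfl; exact h.1 hy

theorem ofList_eq_fdedup (L : List String) : PySem.Set.ofList L = fdedup L := by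
  rw [PySem.Set.ofList_eq_foldl]
  have h := fold_step_closed (fun _ => true) L []
  simpa using h

theorem fold_step_nil (p : String → Bool) (L : List String) :
    L.foldl (fun s x => if p x then PySem.Set.add s x else s) PySem.Set.empty
      = (fdedup L).filter p := by
  have h := fold_step_closed p L []
  simp only [List.not_mem_nil, decide_false, Bool.not_false, Bool.and_true, List.nil_append] at h
  exact h

-- the two ports' set-building folds agree: fold over all k-mers = fold over the distinct k-mers
theorem fold_step_ofList (p : String → Bool) (L : List String) :
    L.foldl (fun s x => if p x then PySem.Set.add s x else s) PySem.Set.empty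
      = (PySem.Set.ofList L).foldl (fun s x => if p x then PySem.Set.add s x else s) PySem.Set.empty := by
  rw [fold_step_nil, fold_step_nil, ofList_eq_fdedup, fdedup_eq_self_of_nodup _ (fdedup_nodup L)]

theorem length_foldl_setD (g : Int → Int) (l : List Int) :
    ∀ (c0 : List Int), (l.foldl (fun c i => PySem.List.pySetD c i (g i)) c0).length = c0.length := by
  induction l with
  | nil => intro c0; rfl
  | cons x l ih => intro c0; simp only [List.foldl_cons, ih, PySem.List.length_pySetD]

-- the count array holds g of each index after the writing loop
theorem getD_foldl_setD (g : Int → Int) (c0 : List Int) :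
    ∀ (M : Nat), M ≤ c0.length → ∀ j, j < M →
      PySem.List.pyGetD
        (((List.range M).map (fun (t : Nat) => (t : Int))).foldl (fun c i => PySem.List.pySetD c i (g i)) c0)
        (j : Int) 0 = g j := by
  intro M
  induction M with
  | zero => intro _ j hj; omega
  | succ M ih =>
    intro hM j hj
    rw [List.range_succ, List.map_append, List.foldl_append]
    simp only [List.map_cons, List.map_nil, List.foldl_cons, List.foldl_nil]
    rw [PySem.List.pySetD_natCast, PySem.List.pyGetD_natCast]
    have hlen : (List.foldl (fun c i => PySem.List.pySetD c i (g i)) c0 (List.map (fun (t : Nat) => (t : Int)) (List.range M))).length = c0.length :=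
      length_foldl_setD g _ c0
    by_cases hjM : j = M
    · subst hjM
      rw [List.getD_eq_getElem?_getD, List.getElem?_set_self (by rw [hlen]; omega)]
      simp
    · have hj' : j < M := by omega
      rw [List.getD_eq_getElem?_getD, List.getElem?_set_ne (by omega)]
      rw [← List.getD_eq_getElem?_getD, ← PySem.List.pyGetD_natCast]
      exact ih (by omega) j hj'

theorem kmer_len (Text : String) (k : Int) (hk : 1 ≤ k) (j : Nat)
    (hj : j < ((PySem.Str.len Text) - k + 1).toNat) :
    PySem.Str.len (PySem.Str.slice Text (some (j:Int)) (some ((j:Int) + k))) = k := by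
  have hkn : k = (k.toNat : Int) := by omega
  simp only [PySem.Str.len] at hj ⊢
  rw [PySem.Str.toList_slice]
  simp only [PySem.Chars.slice_eq_listSlice]
  rw [hkn] at hj ⊢
  rw [PySem.List.slice_natCast_add]
  simp only [List.length_take, List.length_drop]
  omega

-- PatternCount of a k-mer is its count in the list of all k-mers
theorem patternCount_eq (Text : String) (k : Int) (hk : 1 ≤ k) (j : Nat)
    (hj : j < ((PySem.Str.len Text) - k + 1).toNat) :
    PatternCount Text (PySem.Str.slice Text (some (j : Int)) (some ((j : Int) + k)))
      = (((List.range ((PySem.Str.len Text) - k + 1).toNat).map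
          (fun (t : Nat) => PySem.Str.slice Text (some (t : Int)) (some ((t : Int) + k)))).count
          (PySem.Str.slice Text (some (j : Int)) (some ((j : Int) + k))) : Int) := by
  unfold PatternCount
  rw [kmer_len Text k hk j hj]
  dsimp only
  rw [pyRange_zero, List.foldl_map]
  have h := (List.foldl_map
    (f := fun (t : Nat) => PySem.Str.slice Text (some (t : Int)) (some ((t : Int) + k)))
    (g := fun (c : Int) x => if x == PySem.Str.slice Text (some (j : Int)) (some ((j : Int) + k)) then c + 1 else c)
    (l := List.range ((PySem.Str.len Text) - k + 1).toNat) (init := (0 : Int))).symm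
  rw [h, PySem.List.foldl_beq_add_one]
  simp

-- both ports, normalised to folds over the list of all k-mers, agree
theorem AB_core (f : Nat → String) (M : Nat) :
    (List.range M).foldl
      (fun s t => if ((((List.range M).map f).count (f t) : Int) > 1) then PySem.Set.add s (f t) else s)
      PySem.Set.empty
    = ((PySem.Dict.counter ((List.range M).map f)).items).foldl
        (fun s p => if p.2 > 1 then PySem.Set.add s p.1 else s) PySem.Set.empty := by
  set K := (List.range M).map f with hK
  rw [PySem.Dict.items_counter, List.foldl_map]
  have hL : (List.range M).foldl
      (fun s t => if ((K.count (f t) : Int) > 1) then PySem.Set.add s (f t) else s) PySem.Set.empty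
      = K.foldl (fun s x => if ((K.count x : Int) > 1) then PySem.Set.add s x else s) PySem.Set.empty := by
    rw [hK, List.foldl_map]
  rw [hL]
  have h := fold_step_ofList (fun x => decide ((K.count x : Int) > 1)) K
  simp only [decide_eq_true_eq] at h
  exact h

theorem main_eq (Text : String) (k : Int) (hk : 1 ≤ k) :
    FindAllKmers Text k = FindAllKmers_alt Text k := by
  unfold FindAllKmers FindAllKmers_alt
  dsimp only
  rw [pyRange_zero]
  have hMn : ((PySem.Str.len Text) - k + 1).toNat ≤ (List.replicate (PySem.Str.len Text).toNat (0:Int)).length := by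
    simp only [List.length_replicate, PySem.Str.len]; omega
  -- A side: the count array lookup is the k-mer's global count
  have hA : ((List.range ((PySem.Str.len Text) - k + 1).toNat).map (fun (t : Nat) => (t : Int))).foldl
      (fun s i =>
        if PySem.List.pyGetD
            (((List.range ((PySem.Str.len Text) - k + 1).toNat).map (fun (t : Nat) => (t : Int))).foldl
              (fun cnt i => PySem.List.pySetD cnt i (PatternCount Text (PySem.Str.slice Text (some i) (some (i + k)))))
              (List.replicate (PySem.Str.len Text).toNat 0)) i 0 > 1 then
          PySem.Set.add s (PySem.Str.slice Text (some i) (some (i + k)))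
        else s)
      PySem.Set.empty
    = (List.range ((PySem.Str.len Text) - k + 1).toNat).foldl
      (fun (s : PySem.Set String) (t : Nat) =>
        if ((((List.range ((PySem.Str.len Text) - k + 1).toNat).map
              (fun (u : Nat) => PySem.Str.slice Text (some (u : Int)) (some ((u : Int) + k)))).count
              (PySem.Str.slice Text (some (t : Int)) (some ((t : Int) + k))) : Int) > 1) then
          PySem.Set.add s (PySem.Str.slice Text (some (t : Int)) (some ((t : Int) + k)))
        else s)
      PySem.Set.empty := by
    rw [PySem.List.foldl_congr_mem _ _
      (fun s i =>
        if ((((List.range ((PySem.Str.len Text) - k + 1).toNat).map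
              (fun (u : Nat) => PySem.Str.slice Text (some (u : Int)) (some ((u : Int) + k)))).count
              (PySem.Str.slice Text (some i) (some (i + k))) : Int) > 1) then
          PySem.Set.add s (PySem.Str.slice Text (some i) (some (i + k)))
        else s)
      PySem.Set.empty ?_]
    · rw [List.foldl_map]
    · intro acc x hx
      simp only [List.mem_map, List.mem_range] at hx
      obtain ⟨j, hj, rfl⟩ := hx
      rw [getD_foldl_setD _ _ _ hMn j hj, patternCount_eq Text k hk j hj]
  rw [hA, AB_core]
  -- B side: the counting loop is Counter of the k-mer list
  have hB : ((List.range ((PySem.Str.len Text) - k + 1).toNat).map (fun (t : Nat) => (t : Int))).foldl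
      (fun d i =>
        (d.insert (PySem.Str.slice Text (some i) (some (i + k)))
          (d.getD (PySem.Str.slice Text (some i) (some (i + k))) 0 + 1)))
      (PySem.Dict.empty : PySem.Dict String Int)
    = PySem.Dict.counter ((List.range ((PySem.Str.len Text) - k + 1).toNat).map
        (fun (u : Nat) => PySem.Str.slice Text (some (u : Int)) (some ((u : Int) + k)))) := by
    rw [← PySem.Dict.foldl_insert_getD_add_one_eq_counter, List.foldl_map, List.foldl_map]
  exact congrArg (fun d => List.foldl (fun s (p : String × Int) => if p.2 > 1 then PySem.Set.add s p.1 else s) PySem.Set.empty (PySem.Dict.items d)) hB.symm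

-- ===== VERDICT (by name: the statement is the Claim_ definition above) =====
theorem FindAllKmers_spec : Claim_equal_FindAllKmers := by
  intro Text k _ hk
  unfold Spec_FindAllKmers
  exact main_eq Text k hk
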